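-- pv_equiv track=rewrite | github.com/hydraxl/AI-Club-Competition | main.py | path_to_import
-- ===== SOURCE A (Python) =====
-- def path_to_import(path):
--     import_str = ''
--     for c in path:
--         # Filetype is not written
--         if c == '.':
--             break
--         # Subdirectories are demarcated with '.' instead of '/'
--         elif c == '/':
--             import_str += '.'
--         # Everything else is unchanged
--         else:
--             import_str += c
--     return import_str
-- ===== SOURCE B (Python) =====
-- def path_to_import(path):
--     return path.split('.', 1)[0].replace('/', '.')
-- ===== Notes on version B (the rewrite author's own statement) =====
-- stated objective: idiomatic
-- what changed: Replaces the char-by-char loop with early break by taking the first segment of split with maxsplit 1 and then doing a single bulk replace of slashes with dots on that prefix.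
import Mathlib
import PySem

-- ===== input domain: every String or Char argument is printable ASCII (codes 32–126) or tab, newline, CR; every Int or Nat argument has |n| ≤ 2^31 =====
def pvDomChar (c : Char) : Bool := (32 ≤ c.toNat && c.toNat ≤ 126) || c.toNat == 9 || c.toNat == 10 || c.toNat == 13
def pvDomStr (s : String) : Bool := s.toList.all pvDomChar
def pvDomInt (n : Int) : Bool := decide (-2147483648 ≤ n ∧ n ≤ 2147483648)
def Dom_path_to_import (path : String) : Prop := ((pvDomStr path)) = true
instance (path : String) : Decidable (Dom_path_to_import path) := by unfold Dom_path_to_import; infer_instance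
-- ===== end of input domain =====

-- B replaces A's char-by-char loop (break at '.') by split('.',1)[0] followed by a bulk replace('/','.'): idiomatic decomposition, same values.

-- ===== PORT A =====
-- the for-loop with break: scan chars, stop at '.', map '/' to '.', append everything else
def pathToImportLoop : List Char → List Char → List Char
  | [], acc => acc
  | c :: rest, acc =>
    if c = '.' then acc
    else if c = '/' then pathToImportLoop rest (acc ++ ['.'])
    else pathToImportLoop rest (acc ++ [c])

def path_to_import (path : String) : String :=
  String.mk (pathToImportLoop path.toList [])

-- ===== PORT B =====
def path_to_import_alt (path : String) : String :=
  String.mk (PySem.Chars.replace ((PySem.Chars.splitOnMax path.toList ['.'] 1).headD []) ['/'] ['.'])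

-- ===== PRECONDITION & SPEC =====
def Spec_path_to_import (path : String) (out : String) : Prop := out = path_to_import_alt path
instance (path : String) (out : String) : Decidable (Spec_path_to_import path out) := by unfold Spec_path_to_import; infer_instance

-- ===== CLAIM (what is proved, stated in full; the proofs are below) =====
def Claim_equal_path_to_import : Prop := ∀ (path : String), Dom_path_to_import path → Spec_path_to_import path (path_to_import path)

-- ===== LEMMAS AND PROOFS =====

-- common specification: take the prefix before the first '.', mapping '/' to '.'
def pvSpecFun (cs : List Char) : List Char :=
  (cs.takeWhile (· ≠ '.')).map (fun c => if c = '/' then '.' else c)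

theorem pathToImportLoop_eq (cs : List Char) : ∀ acc, pathToImportLoop cs acc = acc ++ pvSpecFun cs := by
  induction cs with
  | nil => intro acc; simp [pathToImportLoop, pvSpecFun]
  | cons c rest ih =>
    intro acc
    by_cases hdot : c = '.'
    · simp [pathToImportLoop, hdot, pvSpecFun]
    · by_cases hsl : c = '/'
      · simp [pathToImportLoop, hdot, hsl, ih, pvSpecFun, List.takeWhile_cons]
      · simp [pathToImportLoop, hdot, hsl, ih, pvSpecFun, List.takeWhile_cons]

theorem replace_go_slash (l : List Char) : ∀ (fuel : Nat) (acc : List Char), l.length ≤ fuel →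
    PySem.Chars.replace.go ['/'] ['.'] fuel l acc
      = acc.reverse ++ l.map (fun c => if c = '/' then '.' else c) := by
  induction l with
  | nil => intro fuel acc _; cases fuel <;> simp [PySem.Chars.replace.go]
  | cons c t ih =>
    intro fuel acc hlen
    cases fuel with
    | zero => simp at hlen
    | succ n =>
      by_cases h : c = '/'
      · simp [PySem.Chars.replace.go, h, List.isPrefixOf,
          ih n ('.'::acc) (by simpa using hlen)]
      · have hp : List.isPrefixOf ['/'] (c :: t) = false := by
          simp [List.isPrefixOf]; exact fun hc => (h hc.symm).elim
        simp [PySem.Chars.replace.go, hp, h,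
          ih n (c::acc) (by simpa using hlen)]

theorem splitOnMax_go_zero (fuel : Nat) (l cur : List Char) (accs : List (List Char)) :
    PySem.Chars.splitOnMax.go ['.'] fuel 0 l cur accs
      = accs.reverse ++ [cur.reverse ++ l] := by
  cases fuel <;> cases l <;> simp [PySem.Chars.splitOnMax.go]

theorem splitOnMax_go_one (l : List Char) : ∀ (fuel : Nat) (cur : List Char) (accs : List (List Char)),
    l.length ≤ fuel →
    ∃ rest, PySem.Chars.splitOnMax.go ['.'] fuel 1 l cur accs
      = accs.reverse ++ (cur.reverse ++ l.takeWhile (· ≠ '.')) :: rest := by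
  induction l with
  | nil => intro fuel cur accs _; cases fuel <;> exact ⟨[], by simp [PySem.Chars.splitOnMax.go]⟩
  | cons c t ih =>
    intro fuel cur accs hlen
    cases fuel with
    | zero => simp at hlen
    | succ n =>
      by_cases h : c = '.'
      · refine ⟨[t], ?_⟩
        simp [PySem.Chars.splitOnMax.go, h, List.isPrefixOf,
          splitOnMax_go_zero n t [] (cur.reverse :: accs), List.takeWhile_cons]
      · have hp : List.isPrefixOf ['.'] (c :: t) = false := by
          simp [List.isPrefixOf]; exact fun hc => (h hc.symm).elim
        obtain ⟨rest, hrest⟩ := ih n (c :: cur) accs (by simpa using hlen)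
        refine ⟨rest, ?_⟩
        simp [PySem.Chars.splitOnMax.go, hp, h, hrest, List.takeWhile_cons]

theorem alt_eq_spec (path : String) : path_to_import_alt path = String.mk (pvSpecFun path.toList) := by
  unfold path_to_import_alt PySem.Chars.splitOnMax
  rw [if_neg (by norm_num)]
  simp only [Int.toNat_one]
  obtain ⟨rest, hrest⟩ := splitOnMax_go_one path.toList (path.toList.length + 1) [] []
    (by omega)
  rw [hrest]
  simp only [List.reverse_nil, List.nil_append, List.headD_cons]
  unfold PySem.Chars.replace
  rw [if_neg (by simp)]
  rw [replace_go_slash _ _ _ le_rfl]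
  simp [pvSpecFun]

-- ===== VERDICT (by name: the statement is the Claim_ definition above) =====
theorem path_to_import_spec : Claim_equal_path_to_import := by
  intro path _
  unfold Spec_path_to_import
  rw [alt_eq_spec]
  unfold path_to_import
  rw [pathToImportLoop_eq]
  simp
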